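-- pv_equiv track=rewrite | github.com/ronanren/CryptoTickerLed | project/run.py | get_position_right
-- ===== SOURCE A (Python) =====
-- def get_position_right(size_canvas, text):
--     position = size_canvas
--     for character in text:
--         if character == '.':
--             position -= 3
--         elif character in ['1', '-']:
--             position -= 5
--         else:
--             position -= 6
--     return position
-- ===== SOURCE B (Python) =====
-- def get_position_right(size_canvas, text):
--     # Closed form: every char costs 6 by default; '.' saves 3, '1' and '-' save 1 each.
--     return size_canvas - 6 * len(text) + 3 * text.count('.') + text.count('1') + text.count('-')
-- ===== Notes on version B (the rewrite author's own statement) =====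
-- stated objective: simpler
-- what changed: Replaced the per-character branching accumulation loop with a closed-form arithmetic expression over len(text) and character counts.
import Mathlib
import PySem

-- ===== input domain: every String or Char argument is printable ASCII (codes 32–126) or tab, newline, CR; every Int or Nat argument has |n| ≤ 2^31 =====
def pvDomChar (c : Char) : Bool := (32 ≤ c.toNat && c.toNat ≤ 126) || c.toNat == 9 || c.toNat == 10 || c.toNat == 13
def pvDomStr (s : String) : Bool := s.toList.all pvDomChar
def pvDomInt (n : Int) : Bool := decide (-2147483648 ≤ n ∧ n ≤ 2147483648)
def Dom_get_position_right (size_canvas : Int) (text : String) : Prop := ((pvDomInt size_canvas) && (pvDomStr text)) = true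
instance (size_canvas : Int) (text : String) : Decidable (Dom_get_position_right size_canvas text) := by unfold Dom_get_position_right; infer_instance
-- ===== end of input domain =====

-- B replaces A's per-character accumulation loop by a closed-form arithmetic expression over character counts (objective: simpler).

-- ===== PORT A =====
def get_position_right (size_canvas : Int) (text : String) : Int :=
  text.toList.foldl
    (fun position character =>
      if character = '.' then position - 3
      else if character = '1' ∨ character = '-' then position - 5
      else position - 6)
    size_canvas

-- ===== PORT B =====
-- text.count('c') for a single character is ported as List.count on the code points (exact for 1-char needles)
def get_position_right_alt (size_canvas : Int) (text : String) : Int :=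
  size_canvas - 6 * (text.toList.length : Int)
    + 3 * (text.toList.count '.' : Int)
    + (text.toList.count '1' : Int)
    + (text.toList.count '-' : Int)

-- ===== PRECONDITION & SPEC =====
def Spec_get_position_right (size_canvas : Int) (text : String) (out : Int) : Prop := out = get_position_right_alt size_canvas text
instance (size_canvas : Int) (text : String) (out : Int) : Decidable (Spec_get_position_right size_canvas text out) := by unfold Spec_get_position_right; infer_instance

-- ===== CLAIM (what is proved, stated in full; the proofs are below) =====
def Claim_equal_get_position_right : Prop := ∀ (size_canvas : Int) (text : String), Dom_get_position_right size_canvas text → Spec_get_position_right size_canvas text (get_position_right size_canvas text)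

-- ===== LEMMAS AND PROOFS =====

theorem pv_foldl_counts (l : List Char) (acc : Int) :
    l.foldl
      (fun position character =>
        if character = '.' then position - 3
        else if character = '1' ∨ character = '-' then position - 5
        else position - 6)
      acc
    = acc - 6 * (l.length : Int) + 3 * (l.count '.') + (l.count '1') + (l.count '-') := by
  induction l generalizing acc with
  | nil => simp
  | cons c cs ih =>
    simp only [List.foldl_cons, List.count_cons, List.length_cons, ih]
    by_cases h1 : c = '.'
    · subst h1; simp; ring
    · by_cases h2 : c = '1'
      · subst h2; simp; ring
      · by_cases h3 : c = '-'
        · subst h3; simp [h1]; ring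
        · simp [h1, h2, h3]; ring

-- ===== VERDICT (by name: the statement is the Claim_ definition above) =====
theorem get_position_right_spec : Claim_equal_get_position_right := by
  intro size_canvas text _
  unfold Spec_get_position_right get_position_right get_position_right_alt
  rw [pv_foldl_counts]
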